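-- pv_equiv track=rewrite | github.com/tuouo/codes | BNDM.py | pre
-- ===== SOURCE A (Python) =====
-- def pre(tarStr):
--     p = {}
--     slen = len(tarStr)
--     shirt = 1 << (slen - 1)
--     for i in range(slen):
--         if tarStr[i] in p:
--             p[tarStr[i]] |= shirt
--         else:
--             p[tarStr[i]] = shirt
--         shirt >>= 1
--     return p
-- ===== SOURCE B (Python) =====
-- def pre(tarStr):
--     # per-character pass: for each distinct char (first-occurrence order),
--     # rebuild its mask by sliding over the whole string once
--     p = {}
--     for c in dict.fromkeys(tarStr):
--         mask = 0
--         for ch in tarStr: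
--             mask = (mask << 1) | (1 if ch == c else 0)
--         p[c] = mask
--     return p
-- ===== Notes on version B (the rewrite author's own statement) =====
-- stated objective: alternative
-- what changed: A fills the dict in one left-to-right pass over positions while a shift register walks down the bit positions; B instead iterates over the distinct characters in first-occurrence order and rebuilds each character's mask in its own pass with a sliding accumulator that shifts left once per character and ORs in a 1 on a match, so the per-position shift state disappears.
import Mathlib
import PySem

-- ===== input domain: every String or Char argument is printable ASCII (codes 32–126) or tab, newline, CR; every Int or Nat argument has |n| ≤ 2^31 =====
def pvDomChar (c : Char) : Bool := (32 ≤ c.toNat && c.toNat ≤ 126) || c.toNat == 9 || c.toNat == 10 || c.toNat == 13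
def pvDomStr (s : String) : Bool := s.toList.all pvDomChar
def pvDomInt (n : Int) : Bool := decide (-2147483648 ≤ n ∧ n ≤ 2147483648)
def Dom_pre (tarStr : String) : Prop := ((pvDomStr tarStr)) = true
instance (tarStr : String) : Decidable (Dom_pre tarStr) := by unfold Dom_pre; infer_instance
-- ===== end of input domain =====

-- B replaces A's single left-to-right pass (dict updated per position while a shift register walks down)
-- by a per-distinct-character pass that rebuilds each character's mask with a sliding accumulator; objective: alternative (not faster).

-- ===== PORT A =====
-- one loop iteration of A: dict update for the current character, then shirt >>= 1
def preStep (st : PySem.Dict String Int × Int) (ch : Char) : PySem.Dict String Int × Int :=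
  let key := String.ofList [ch]
  let p := match st.1.get? key with
    | some v => st.1.insert key (PySem.Int.bor v st.2)   -- p[tarStr[i]] |= shirt
    | none => st.1.insert key st.2                        -- p[tarStr[i]] = shirt
  (p, st.2 >>> (1 : Nat))

def pre (tarStr : String) : List (String × Int) :=
  let cs := tarStr.toList
  let slen := cs.length
  let res := (PySem.List.pyRange 0 (PySem.List.len cs)).foldl
    (fun st i => preStep st (PySem.List.pyGetD cs i ' '))
    ((PySem.Dict.empty : PySem.Dict String Int), (1 : Int) <<< (slen - 1))
  res.1.items

-- ===== PORT B =====
def pre_alt (tarStr : String) : List (String × Int) :=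
  let cs := tarStr.toList
  ((PySem.List.dedup cs).foldl
    (fun p c =>
      let mask := cs.foldl (fun m ch => PySem.Int.bor (m <<< (1 : Nat)) (if ch == c then 1 else 0)) (0 : Int)
      p.insert (String.ofList [c]) mask)
    (PySem.Dict.empty : PySem.Dict String Int)).items

-- ===== PRECONDITION & SPEC =====
-- Pre_ excludes only the empty string, on which A raises ValueError: its initial shift amount slen - 1 is negative there.
def Pre_pre (tarStr : String) : Prop := tarStr.toList ≠ []
instance (tarStr : String) : Decidable (Pre_pre tarStr) := by unfold Pre_pre; infer_instance
def pvWitness_pre : String := ("ab")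

def Spec_pre (tarStr : String) (out : List (String × Int)) : Prop := out = pre_alt tarStr
instance (tarStr : String) (out : List (String × Int)) : Decidable (Spec_pre tarStr out) := by unfold Spec_pre; infer_instance

-- ===== CLAIM (what is proved, stated in full; the proofs are below) =====
def Claim_equal_pre : Prop := ∀ (tarStr : String), Dom_pre tarStr → Pre_pre tarStr → Spec_pre tarStr (pre tarStr)

-- ===== LEMMAS AND PROOFS =====

-- B's per-character mask (the inner loop of pre_alt), as a named function for the proofs
def maskOf (cs : List Char) (c : Char) : Int :=
  cs.foldl (fun m ch => PySem.Int.bor (m <<< (1 : Nat)) (if ch == c then 1 else 0)) 0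

theorem bor_nonneg {a b : Int} (ha : 0 ≤ a) (hb : 0 ≤ b) : 0 ≤ PySem.Int.bor a b := by
  rw [PySem.Int.bor_of_nonneg ha hb]; exact Int.natCast_nonneg _

theorem shiftLeft_nonneg {a : Int} (ha : 0 ≤ a) (k : Nat) : 0 ≤ a <<< k := by
  rw [Int.shiftLeft_eq]; positivity

theorem shiftLeft_shiftLeft (a : Int) (j k : Nat) : (a <<< j) <<< k = a <<< (j + k) := by
  simp [Int.shiftLeft_eq, pow_add]; ring

theorem bor_shiftLeft {a b : Int} (ha : 0 ≤ a) (hb : 0 ≤ b) (k : Nat) :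
    (PySem.Int.bor a b) <<< k = PySem.Int.bor (a <<< k) (b <<< k) := by
  have h1 : a <<< k = ((a.toNat <<< k : Nat) : Int) := by
    rw [Int.natCast_shiftLeft, Int.toNat_of_nonneg ha]
  have h2 : b <<< k = ((b.toNat <<< k : Nat) : Int) := by
    rw [Int.natCast_shiftLeft, Int.toNat_of_nonneg hb]
  rw [PySem.Int.bor_of_nonneg ha hb, h1, h2, PySem.Int.bor_natCast,
    ← Nat.shiftLeft_or_distrib]
  norm_cast

theorem one_shiftLeft_succ_shr (k : Nat) : ((1 : Int) <<< (k + 1)) >>> (1 : Nat) = (1 : Int) <<< k := by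
  have h : ((1 : Int) <<< (k + 1)) = ((2 ^ (k + 1) : Nat) : Int) := by
    rw [Int.shiftLeft_eq]; push_cast; ring
  rw [h, ← Int.natCast_shiftRight]
  have h2 : (2 ^ (k + 1) : Nat) >>> 1 = 2 ^ k := by
    rw [Nat.shiftRight_succ, Nat.shiftRight_zero, pow_succ, Nat.mul_div_cancel]
    omega
  rw [h2, Int.shiftLeft_eq]; push_cast; ring

theorem maskOf_nonneg (cs : List Char) (c : Char) : 0 ≤ maskOf cs c := by
  have aux : ∀ (l : List Char) (m : Int), 0 ≤ m →
      0 ≤ l.foldl (fun m ch => PySem.Int.bor (m <<< (1 : Nat)) (if ch == c then 1 else 0)) m := by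
    intro l
    induction l with
    | nil => intro m hm; simpa using hm
    | cons ch t ih =>
      intro m hm
      simp only [List.foldl_cons]
      exact ih _ (bor_nonneg (shiftLeft_nonneg hm 1) (by split <;> norm_num))
  exact aux cs 0 le_rfl

theorem maskOf_append (l : List Char) (ch c : Char) :
    maskOf (l ++ [ch]) c = PySem.Int.bor (maskOf l c <<< (1 : Nat)) (if ch == c then 1 else 0) := by
  simp [maskOf, List.foldl_append]

theorem maskOf_not_mem {cs : List Char} {c : Char} (h : c ∉ cs) : maskOf cs c = 0 := by
  induction cs with
  | nil => rfl
  | cons ch t ih =>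
    have hne : (ch == c) = false := by
      simp only [beq_eq_false_iff_ne]; intro he; exact h (he ▸ List.mem_cons_self ..)
    have ht : c ∉ t := fun hc => h (List.mem_cons_of_mem _ hc)
    simp only [maskOf, List.foldl_cons] at *
    rw [show ((0 : Int) <<< (1 : Nat)) = 0 by decide, hne]
    simpa [PySem.Int.bor] using ih ht

theorem ofList_singleton_inj {x c : Char} (h : String.ofList [x] = String.ofList [c]) : x = c := by
  have := String.ofList_inj.mp h
  simpa using this

theorem mk_beq_mk (x c : Char) : (String.ofList [x] == String.ofList [c]) = (x == c) := by
  by_cases h : x = c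
  · subst h; simp
  · have hne : String.ofList [x] ≠ String.ofList [c] := fun he => h (ofList_singleton_inj he)
    rw [beq_eq_false_iff_ne.mpr hne, beq_eq_false_iff_ne.mpr h]

theorem bor_zero_left (a : Int) : PySem.Int.bor 0 a = a := by
  rw [PySem.Int.bor_comm, PySem.Int.bor_zero]

theorem maskOf_append_shift (l : List Char) (ch x : Char) (k : Nat) :
    maskOf (l ++ [ch]) x <<< k =
      if x = ch then PySem.Int.bor (maskOf l x <<< (k + 1)) ((1 : Int) <<< k)
      else maskOf l x <<< (k + 1) := by
  rw [maskOf_append]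
  by_cases hx : x = ch
  · subst hx
    rw [if_pos rfl, show (if (x == x) = true then (1 : Int) else 0) = 1 by simp,
      bor_shiftLeft (shiftLeft_nonneg (maskOf_nonneg l x) 1) (by norm_num) k,
      shiftLeft_shiftLeft, Nat.add_comm 1 k]
  · have hb : (ch == x) = false := beq_eq_false_iff_ne.mpr (fun he => hx (he ▸ rfl))
    rw [if_neg hx, hb, show (if (false = true) then (1 : Int) else 0) = 0 by simp,
      PySem.Int.bor_zero, shiftLeft_shiftLeft, Nat.add_comm 1 k]

theorem find_mapped_mem {l : List Char} (g : Char → Int) {c : Char} (h : c ∈ l) (hnd : l.Nodup) :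
    List.find? (fun p => p.1 == String.ofList [c]) (l.map fun x => (String.ofList [x], g x))
      = some (String.ofList [c], g c) := by
  induction l with
  | nil => cases h
  | cons a t ih =>
    rcases List.mem_cons.mp h with h1 | h1
    · subst h1; simp
    · have hna : a ≠ c := by
        rintro rfl; exact (List.nodup_cons.mp hnd).1 h1
      simp only [List.map_cons, List.find?_cons, mk_beq_mk]
      rw [show (a == c) = false from beq_eq_false_iff_ne.mpr hna]
      exact ih h1 (List.nodup_cons.mp hnd).2

theorem find_mapped_not_mem {l : List Char} (g : Char → Int) {c : Char} (h : c ∉ l) :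
    List.find? (fun p => p.1 == String.ofList [c]) (l.map fun x => (String.ofList [x], g x)) = none := by
  induction l with
  | nil => rfl
  | cons a t ih =>
    have hna : a ≠ c := fun he => h (he ▸ List.mem_cons_self ..)
    simp only [List.map_cons, List.find?_cons, mk_beq_mk]
    rw [show (a == c) = false from beq_eq_false_iff_ne.mpr hna]
    exact ih (fun hc => h (List.mem_cons_of_mem _ hc))

theorem contains_mapped (l : List Char) (g : Char → Int) (c : Char) :
    (PySem.Dict.contains ⟨l.map fun x => (String.ofList [x], g x)⟩ (String.ofList [c])) = l.contains c := by
  simp only [PySem.Dict.contains, List.any_map, Function.comp_def, mk_beq_mk]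
  exact List.any_beq'

theorem dedup_append_singleton (l : List Char) (x : Char) :
    PySem.List.dedup (l ++ [x]) =
      if x ∈ PySem.List.dedup l then PySem.List.dedup l else PySem.List.dedup l ++ [x] := by
  have h1 : PySem.List.dedup (l ++ [x]) = PySem.Set.add (PySem.List.dedup l) x := by
    simp [PySem.List.dedup, PySem.Set.ofList, List.foldl_append]
  rw [h1, PySem.Set.add, PySem.Set.contains]
  simp [List.contains_eq_mem]

-- the invariant of A's loop: after the processed prefix pre', the dict holds the prefix masks
-- (shifted up by the remaining length) and shirt is the next bit
theorem foldA (suf : List Char) : ∀ (pre' : List Char),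
    (suf.foldl preStep
      (⟨(PySem.List.dedup pre').map (fun c => (String.ofList [c], maskOf pre' c <<< suf.length))⟩,
       ((1 : Int) <<< suf.length) >>> (1 : Nat))).1.items
    = (PySem.List.dedup (pre' ++ suf)).map (fun c => (String.ofList [c], maskOf (pre' ++ suf) c)) := by
  induction suf with
  | nil =>
    intro pre'
    simp
  | cons ch suf' ih =>
    intro pre'
    rw [List.foldl_cons]
    have hlen : (ch :: suf').length = suf'.length + 1 := rfl
    have hstep : preStep
        (⟨(PySem.List.dedup pre').map (fun c => (String.ofList [c], maskOf pre' c <<< (ch :: suf').length))⟩,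
         ((1 : Int) <<< (ch :: suf').length) >>> (1 : Nat)) ch
        = (⟨(PySem.List.dedup (pre' ++ [ch])).map
              (fun c => (String.ofList [c], maskOf (pre' ++ [ch]) c <<< suf'.length))⟩,
           ((1 : Int) <<< suf'.length) >>> (1 : Nat)) := by
      rw [hlen, one_shiftLeft_succ_shr]
      by_cases hmem : ch ∈ pre'
      · have hded : ch ∈ PySem.List.dedup pre' := (PySem.List.mem_dedup pre' ch).mpr hmem
        have hget : (PySem.Dict.get?
            (⟨(PySem.List.dedup pre').map
                (fun c => (String.ofList [c], maskOf pre' c <<< (suf'.length + 1)))⟩ :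
              PySem.Dict String Int) (String.ofList [ch]))
            = some (maskOf pre' ch <<< (suf'.length + 1)) := by
          simp only [PySem.Dict.get?]
          rw [find_mapped_mem _ hded (PySem.List.nodup_dedup pre')]
          rfl
        have hcon : (PySem.Dict.contains
            (⟨(PySem.List.dedup pre').map
                (fun c => (String.ofList [c], maskOf pre' c <<< (suf'.length + 1)))⟩ :
              PySem.Dict String Int) (String.ofList [ch])) = true := by
          rw [contains_mapped, List.contains_eq_mem]
          exact decide_eq_true hded
        simp only [preStep, hget, PySem.Dict.insert, hcon, if_true]
        refine Prod.ext ?_ rfl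
        show PySem.Dict.mk _ = PySem.Dict.mk _
        congr 1
        rw [dedup_append_singleton, if_pos hded, List.map_map]
        refine List.map_congr_left ?_
        intro x hx
        simp only [Function.comp_def, mk_beq_mk]
        rw [maskOf_append_shift]
        by_cases hxc : x = ch
        · subst hxc
          simp
        · have hb : (x == ch) = false := beq_eq_false_iff_ne.mpr hxc
          rw [hb, if_neg hxc, show (if (false = true) then
            ((String.ofList [ch], PySem.Int.bor (maskOf pre' ch <<< (suf'.length + 1))
              ((1 : Int) <<< suf'.length)) : String × Int)
            else (String.ofList [x], maskOf pre' x <<< (suf'.length + 1)))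
            = (String.ofList [x], maskOf pre' x <<< (suf'.length + 1)) by simp]
      · have hded : ch ∉ PySem.List.dedup pre' := fun hc => hmem ((PySem.List.mem_dedup pre' ch).mp hc)
        have hget : (PySem.Dict.get?
            (⟨(PySem.List.dedup pre').map
                (fun c => (String.ofList [c], maskOf pre' c <<< (suf'.length + 1)))⟩ :
              PySem.Dict String Int) (String.ofList [ch])) = none := by
          simp only [PySem.Dict.get?]
          rw [find_mapped_not_mem _ hded]
          rfl
        have hcon : (PySem.Dict.contains
            (⟨(PySem.List.dedup pre').map
                (fun c => (String.ofList [c], maskOf pre' c <<< (suf'.length + 1)))⟩ :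
              PySem.Dict String Int) (String.ofList [ch])) = false := by
          rw [contains_mapped, List.contains_eq_mem]
          exact decide_eq_false hded
        simp only [preStep, hget, PySem.Dict.insert, hcon, Bool.false_eq_true, if_false]
        refine Prod.ext ?_ rfl
        show PySem.Dict.mk _ = PySem.Dict.mk _
        congr 1
        rw [dedup_append_singleton, if_neg hded, List.map_append]
        congr 1
        · refine List.map_congr_left ?_
          intro x hx
          have hxc : x ≠ ch := fun he =>
            hmem (he ▸ (PySem.List.mem_dedup pre' x).mp hx)
          rw [maskOf_append_shift, if_neg hxc]
        · rw [List.map_cons, List.map_nil, maskOf_append_shift, if_pos rfl,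
            maskOf_not_mem hmem, show ((0 : Int) <<< (suf'.length + 1)) = 0 by
              rw [Int.shiftLeft_eq]; ring, bor_zero_left]
    rw [hstep, ih (pre' ++ [ch]), List.append_assoc]
    rfl

theorem foldB (g : Char → Int) :
    ∀ (l : List Char), l.Nodup → ∀ (acc : List (String × Int)),
      (∀ c ∈ l, ∀ p ∈ acc, p.1 ≠ String.ofList [c]) →
      ((l.foldl (fun p c => PySem.Dict.insert p (String.ofList [c]) (g c)) ⟨acc⟩).items
        = acc ++ l.map (fun c => (String.ofList [c], g c))) := by
  intro l
  induction l with
  | nil => intro _ acc _; simp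
  | cons c t ih =>
    intro hnd acc hdisj
    rw [List.foldl_cons]
    have hcon : PySem.Dict.contains (⟨acc⟩ : PySem.Dict String Int) (String.ofList [c]) = false := by
      simp only [PySem.Dict.contains, List.any_eq_false]
      intro p hp
      have := hdisj c (List.mem_cons_self ..) p hp
      simp [this]
    have hins : PySem.Dict.insert (⟨acc⟩ : PySem.Dict String Int) (String.ofList [c]) (g c)
        = ⟨acc ++ [(String.ofList [c], g c)]⟩ := by
      rw [PySem.Dict.insert, hcon]; simp
    rw [hins, ih (List.nodup_cons.mp hnd).2 _ ?_]
    · simp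
    · intro c' hc' p hp
      rcases List.mem_append.mp hp with h1 | h1
      · exact hdisj c' (List.mem_cons_of_mem _ hc') p h1
      · have : p = (String.ofList [c], g c) := by simpa using h1
        subst this
        intro he
        exact (List.nodup_cons.mp hnd).1 (ofList_singleton_inj he ▸ hc')

-- ===== VERDICT (by name: the statement is the Claim_ definition above) =====
theorem pre_spec : Claim_equal_pre := by
  intro t _hd hp
  unfold Spec_pre
  unfold Pre_pre at hp
  obtain ⟨c0, rest, hcs⟩ : ∃ c0 rest, t.toList = c0 :: rest := by
    cases h : t.toList with
    | nil => exact absurd h hp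
    | cons a l => exact ⟨a, l, rfl⟩
  have hA : pre t = (PySem.List.dedup t.toList).map
      (fun c => (String.ofList [c], maskOf t.toList c)) := by
    simp only [pre]
    rw [PySem.List.foldl_pyRange_pyGetD t.toList ' '
      preStep ((PySem.Dict.empty : PySem.Dict String Int), (1 : Int) <<< (t.toList.length - 1))
      (le_refl 0)]
    rw [hcs]
    simp only [Int.toNat_zero, List.drop_zero, List.length_cons, Nat.add_sub_cancel]
    rw [← one_shiftLeft_succ_shr rest.length]
    have h := foldA (c0 :: rest) []
    simp only [List.nil_append, List.length_cons] at h
    exact h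
  have hB : pre_alt t = (PySem.List.dedup t.toList).map
      (fun c => (String.ofList [c], maskOf t.toList c)) := by
    have h := foldB (fun c => maskOf t.toList c) (PySem.List.dedup t.toList)
      (PySem.List.nodup_dedup t.toList) [] (by intro c _ p hp'; cases hp')
    simp only [List.nil_append] at h
    simp only [pre_alt]
    exact h
  rw [hA, hB]
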